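-- pv_equiv track=rewrite | github.com/keiredin/leetcode | 0809-expressive-words/0809-expressive-words.py | isStretchy
-- ===== SOURCE A (Python) =====
-- def isStretchy(word,s):
--     i, j = 0, 0
--     while i < len(s) and j < len(word):
--         if s[i] != word[j]:
--             break
--         count_s, count_w = 1, 1
--
--         #count consequetive characters in s
--         while i < len(s) - 1 and s[i] == s[i+1]:
--             i += 1
--             count_s += 1
--
--         #count consequetive characters in cur word
--         while j < len(word) - 1 and word[j] == word[j+1]:
--             j += 1
--             count_w += 1
--
--
--         if count_s < count_w or (count_s > count_w and count_s < 3):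
--             break
--         i += 1
--         j += 1
--     if i == len(s) and j == len(word):
--         return 1
--     else:
--         return 0
-- ===== SOURCE B (Python) =====
-- def isStretchy(word, s):
--     def groups(x):
--         res = []
--         if not x:
--             return res
--         cur, n = x[0], 1
--         for ch in x[1:]:
--             if ch == cur:
--                 n += 1
--             else:
--                 res.append((cur, n))
--                 cur, n = ch, 1
--         res.append((cur, n))
--         return res
--     gw, gs = groups(word), groups(s)
--     if len(gw) != len(gs):
--         return 0
--     for (cw, nw), (cs, ns) in zip(gw, gs):
--         if cw != cs or ns < nw or (ns > nw and ns < 3):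
--             return 0
--     return 1
-- ===== Notes on version B (the rewrite author's own statement) =====
-- stated objective: simpler
-- what changed: Replaces A's interleaved two-pointer index loop (with nested run-counting whiles over both strings at once) by run-length encoding each string once and comparing the aligned (char,count) group lists.
import Mathlib
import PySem

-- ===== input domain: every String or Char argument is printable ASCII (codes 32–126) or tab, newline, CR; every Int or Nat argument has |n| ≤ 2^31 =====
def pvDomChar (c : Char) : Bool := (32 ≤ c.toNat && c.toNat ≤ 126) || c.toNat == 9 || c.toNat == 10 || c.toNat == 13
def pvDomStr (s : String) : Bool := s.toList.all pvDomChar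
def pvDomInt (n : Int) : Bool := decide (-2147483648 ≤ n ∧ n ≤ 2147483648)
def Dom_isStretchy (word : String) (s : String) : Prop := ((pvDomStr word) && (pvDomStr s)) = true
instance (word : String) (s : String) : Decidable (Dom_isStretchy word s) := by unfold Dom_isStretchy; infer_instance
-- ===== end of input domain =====

-- B replaces A's index-juggling two-pointer loop by run-length encoding both strings
-- once and comparing the aligned groups (objective: simpler).

-- ===== PORT A =====
-- inner while of A: count consecutive equal characters starting at index i
-- (fuel only makes the recursion structural; with fuel = l.length - i the guard
--  is false whenever fuel runs out, so the loop is exactly A's)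
def pvRunA (l : List Char) (fuel i cnt : Nat) : Nat × Nat :=
  match fuel with
  | 0 => (i, cnt)
  | f + 1 =>
    if i < l.length - 1 ∧ l[i]? = l[i+1]? then pvRunA l f (i+1) (cnt+1) else (i, cnt)

-- outer while of A (fuel = s.length suffices: i strictly increases each iteration)
def pvLoopA (s w : List Char) (fuel i j : Nat) : Nat × Nat :=
  match fuel with
  | 0 => (i, j)
  | f + 1 =>
    if i < s.length ∧ j < w.length then
      if s[i]? ≠ w[j]? then (i, j)
      else
        let p := pvRunA s (s.length - i) i 1
        let q := pvRunA w (w.length - j) j 1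
        if p.2 < q.2 ∨ (p.2 > q.2 ∧ p.2 < 3) then (p.1, q.1)
        else pvLoopA s w f (p.1 + 1) (q.1 + 1)
    else (i, j)

def isStretchy (word : String) (s : String) : Int :=
  let r := pvLoopA s.toList word.toList s.toList.length 0 0
  if r.1 = s.toList.length ∧ r.2 = word.toList.length then 1 else 0

-- ===== PORT B =====
-- B's groups(): one left-to-right scan carrying the current run (char, count)
def pvGroupsGo (xs : List Char) (cur : Char) (n : Nat) : List (Char × Nat) :=
  match xs with
  | [] => [(cur, n)]
  | b :: rest => if b == cur then pvGroupsGo rest cur (n+1) else (cur, n) :: pvGroupsGo rest b 1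

def pvGroups : List Char → List (Char × Nat)
  | [] => []
  | c :: rest => pvGroupsGo rest c 1

-- B's length check and zipped loop, as one paired recursion
def pvMatch : List (Char × Nat) → List (Char × Nat) → Bool
  | [], [] => true
  | (cw, nw) :: gw, (cs, ns) :: gs =>
      if cw ≠ cs ∨ ns < nw ∨ (ns > nw ∧ ns < 3) then false else pvMatch gw gs
  | _, _ => false

def isStretchy_alt (word : String) (s : String) : Int :=
  if pvMatch (pvGroups word.toList) (pvGroups s.toList) then 1 else 0

-- ===== PRECONDITION & SPEC =====
def Spec_isStretchy (word : String) (s : String) (out : Int) : Prop := out = isStretchy_alt word s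
instance (word : String) (s : String) (out : Int) : Decidable (Spec_isStretchy word s out) := by unfold Spec_isStretchy; infer_instance

-- ===== CLAIM (what is proved, stated in full; the proofs are below) =====
def Claim_equal_isStretchy : Prop := ∀ (word : String) (s : String), Dom_isStretchy word s → Spec_isStretchy word s (isStretchy word s)

-- ===== LEMMAS AND PROOFS =====

lemma pvGroupsGo_eq (cur : Char) : ∀ (xs : List Char) (n : Nat),
    pvGroupsGo xs cur n = (cur, n + (xs.takeWhile (· == cur)).length) :: pvGroups (xs.dropWhile (· == cur)) := by
  intro xs
  induction xs generalizing cur with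
  | nil => intro n; simp [pvGroupsGo, pvGroups]
  | cons b rest ih =>
    intro n
    by_cases h : b = cur
    · subst h
      have hbeq : (b == b) = true := by simp
      simp only [pvGroupsGo, hbeq, if_true, List.takeWhile, List.dropWhile]
      rw [ih b (n+1)]
      simp
      omega
    · have hbeq : (b == cur) = false := by simp [h]
      simp only [pvGroupsGo, hbeq, if_false, List.takeWhile, List.dropWhile, Bool.false_eq_true]
      simp [pvGroups]

lemma pvGroups_cons (c : Char) (rest : List Char) :
    pvGroups (c :: rest) = (c, 1 + (rest.takeWhile (· == c)).length) :: pvGroups (rest.dropWhile (· == c)) := by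
  rw [pvGroups, pvGroupsGo_eq]

lemma dropWhile_eq_drop_len (p : Char → Bool) (l : List Char) :
    l.dropWhile p = l.drop (l.takeWhile p).length := by
  induction l with
  | nil => simp
  | cons a l ih =>
    by_cases h : p a
    · simp [List.dropWhile, List.takeWhile, h, ih]
    · simp [List.dropWhile, List.takeWhile, h]

lemma pvRunA_spec (s : List Char) (c : Char) :
    ∀ (rest : List Char) (i cnt : Nat), s.drop i = c :: rest →
      pvRunA s (s.length - i) i cnt =
        (i + (rest.takeWhile (· == c)).length, cnt + (rest.takeWhile (· == c)).length) := by
  intro rest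
  induction rest with
  | nil =>
    intro i cnt h
    have hlen : s.length - i = 1 := by
      have := congrArg List.length h
      simp [List.length_drop] at this
      omega
    rw [hlen, pvRunA]
    rw [if_neg]
    · simp
    · intro ⟨h1, _⟩; omega
  | cons b rest' ih =>
    intro i cnt h
    have hlen : s.length - i = rest'.length + 2 := by
      have := congrArg List.length h
      simp [List.length_drop] at this
      omega
    have hi : s[i]? = some c := by
      have : (s.drop i)[0]? = s[i + 0]? := List.getElem?_drop
      simpa [h] using this.symm
    have hi1 : s[i+1]? = some b := by
      have : (s.drop i)[1]? = s[i + 1]? := List.getElem?_drop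
      simpa [h] using this.symm
    by_cases hbc : b = c
    · subst hbc
      have hdrop : s.drop (i+1) = b :: rest' := by
        have : List.drop 1 (s.drop i) = s.drop (i + 1) := List.drop_drop
        rw [h] at this
        simpa using this.symm
      rw [hlen, pvRunA, if_pos ⟨by omega, by rw [hi, hi1]⟩]
      have hlen' : rest'.length + 1 = s.length - (i+1) := by omega
      rw [hlen', ih (i+1) (cnt+1) hdrop]
      simp [List.takeWhile]
      constructor <;> omega
    · rw [hlen, pvRunA, if_neg]
      · have hbeq : (b == c) = false := by simp [hbc]
        simp [List.takeWhile, hbeq]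
      · intro ⟨_, heq⟩
        rw [hi, hi1] at heq
        exact hbc (Option.some.injEq .. ▸ heq).symm

lemma pvLoop_spec (s w : List Char) :
    ∀ (fuel : Nat) (t u : List Char) (i j : Nat),
      s.length - i ≤ fuel → s.drop i = t → w.drop j = u →
      i ≤ s.length → j ≤ w.length →
      (((pvLoopA s w fuel i j).1 = s.length ∧ (pvLoopA s w fuel i j).2 = w.length) ↔
        pvMatch (pvGroups u) (pvGroups t) = true) := by
  intro fuel
  induction fuel with
  | zero =>
    intro t u i j hf ht hu hi hj
    have hieq : i = s.length := by omega
    have ht0 : t = [] := by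
      have := congrArg List.length ht; simp [List.length_drop] at this
      exact List.length_eq_zero_iff.mp (by omega)
    subst ht0
    rw [pvLoopA]
    cases u with
    | nil =>
      have hjeq : j = w.length := by
        have := congrArg List.length hu; simp [List.length_drop] at this; omega
      simp [pvGroups, pvMatch, hieq, hjeq]
    | cons d u' =>
      have hjlt : j < w.length := by
        have := congrArg List.length hu; simp [List.length_drop] at this; omega
      rw [pvGroups, pvGroups_cons]
      simp [pvMatch, hieq]
      omega
  | succ f ih =>
    intro t u i j hf ht hu hi hj
    cases t with
    | nil =>
      have hieq : i = s.length := by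
        have := congrArg List.length ht; simp [List.length_drop] at this; omega
      rw [pvLoopA, if_neg (by omega)]
      cases u with
      | nil =>
        have hjeq : j = w.length := by
          have := congrArg List.length hu; simp [List.length_drop] at this; omega
        simp [pvGroups, pvMatch, hieq, hjeq]
      | cons d u' =>
        have hjlt : j < w.length := by
          have := congrArg List.length hu; simp [List.length_drop] at this; omega
        rw [pvGroups, pvGroups_cons]
        simp [pvMatch, hieq]
        omega
    | cons c t' =>
      have hilt : i < s.length := by
        have := congrArg List.length ht; simp [List.length_drop] at this; omega
      cases u with
      | nil =>
        have hjeq : j = w.length := by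
          have := congrArg List.length hu; simp [List.length_drop] at this; omega
        rw [pvLoopA, if_neg (by omega)]
        rw [pvGroups, pvGroups_cons]
        simp [pvMatch]
        omega
      | cons d u' =>
        have hjlt : j < w.length := by
          have := congrArg List.length hu; simp [List.length_drop] at this; omega
        have hsi : s[i]? = some c := by
          have : (s.drop i)[0]? = s[i + 0]? := List.getElem?_drop
          simpa [ht] using this.symm
        have hwj : w[j]? = some d := by
          have : (w.drop j)[0]? = w[j + 0]? := List.getElem?_drop
          simpa [hu] using this.symm
        rw [pvLoopA, if_pos ⟨hilt, hjlt⟩]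
        by_cases hcd : c = d
        · subst hcd
          rw [if_neg (by simp [hsi, hwj])]
          set ks := (t'.takeWhile (· == c)).length with hks
          set kw := (u'.takeWhile (· == c)).length with hkw
          rw [pvRunA_spec s c t' i 1 ht, pvRunA_spec w c u' j 1 hu]
          simp only
          have hks_le : ks ≤ t'.length := by
            have := (List.takeWhile_prefix (p := (· == c)) (l := t')).length_le; omega
          have hkw_le : kw ≤ u'.length := by
            have := (List.takeWhile_prefix (p := (· == c)) (l := u')).length_le; omega
          have htlen : s.length - i = t'.length + 1 := by
            have := congrArg List.length ht; simp [List.length_drop] at this; omega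
          have hulen : w.length - j = u'.length + 1 := by
            have := congrArg List.length hu; simp [List.length_drop] at this; omega
          rw [pvGroups_cons, pvGroups_cons]
          by_cases hbreak : 1 + ks < 1 + kw ∨ (1 + ks > 1 + kw ∧ 1 + ks < 3)
          · rw [if_pos hbreak]
            rw [pvMatch]
            rw [if_pos (by right; omega)]
            simp
            omega
          · rw [if_neg hbreak]
            rw [pvMatch]
            rw [if_neg (by push Not; push Not at hbreak; exact ⟨rfl, by omega, by omega⟩)]
            have hdropS : s.drop (i + ks + 1) = t'.dropWhile (· == c) := by
              rw [dropWhile_eq_drop_len, ← hks]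
              have h1 : s.drop (i+1) = t' := by
                have : List.drop 1 (s.drop i) = s.drop (i + 1) := List.drop_drop
                rw [ht] at this
                simpa using this.symm
              have : List.drop ks (s.drop (i+1)) = s.drop ((i+1) + ks) := List.drop_drop
              rw [h1] at this
              rw [show i + ks + 1 = (i+1) + ks by omega]
              exact this.symm
            have hdropW : w.drop (j + kw + 1) = u'.dropWhile (· == c) := by
              rw [dropWhile_eq_drop_len, ← hkw]
              have h1 : w.drop (j+1) = u' := by
                have : List.drop 1 (w.drop j) = w.drop (j + 1) := List.drop_drop
                rw [hu] at this
                simpa using this.symm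
              have : List.drop kw (w.drop (j+1)) = w.drop ((j+1) + kw) := List.drop_drop
              rw [h1] at this
              rw [show j + kw + 1 = (j+1) + kw by omega]
              exact this.symm
            exact ih (t'.dropWhile (· == c)) (u'.dropWhile (· == c)) (i + ks + 1) (j + kw + 1)
              (by omega) hdropS hdropW (by omega) (by omega)
        · rw [if_pos (by simp [hsi, hwj]; exact fun h => hcd h)]
          rw [pvGroups_cons, pvGroups_cons, pvMatch]
          rw [if_pos (by left; exact fun h => hcd h.symm)]
          simp
          omega

-- ===== VERDICT (by name: the statement is the Claim_ definition above) =====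
theorem isStretchy_spec : Claim_equal_isStretchy := by
  intro word s _
  unfold Spec_isStretchy isStretchy isStretchy_alt
  have h := pvLoop_spec s.toList word.toList s.toList.length s.toList word.toList 0 0
    (by omega) (by simp) (by simp) (by omega) (by omega)
  simp only
  split_ifs with h1 h2 h2
  · rfl
  · exact absurd (h.mp h1) h2
  · exact absurd (h.mpr h2) h1
  · rfl
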